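-- pv_equiv track=rewrite | github.com/raeez/chiral-bar-cobar | compute/lib/theorem_wall_crossing_mc_engine.py | euler_form
-- ===== SOURCE A (Python) =====
-- from typing import Any, Dict, List, Optional, Sequence, Tuple
--
-- def euler_form(gamma1: Tuple[int, ...], gamma2: Tuple[int, ...]) -> int:
--     r"""Skew-symmetric Euler form on the charge lattice Z^r.
--
--     For r=2: <(a,b), (c,d)> = ad - bc  (standard symplectic form).
--     For general r: sum_{i<j} (gamma1[i]*gamma2[j] - gamma1[j]*gamma2[i]).
--     """
--     n = len(gamma1)
--     assert len(gamma2) == n, "Charge vectors must have equal dimension"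
--     if n == 2:
--         return gamma1[0] * gamma2[1] - gamma1[1] * gamma2[0]
--     total = 0
--     for i in range(n):
--         for j in range(i + 1, n):
--             total += gamma1[i] * gamma2[j] - gamma1[j] * gamma2[i]
--     return total
-- ===== SOURCE B (Python) =====
-- from typing import Tuple
--
-- def euler_form(gamma1: Tuple[int, ...], gamma2: Tuple[int, ...]) -> int:
--     """Single O(n) pass: pair each element with running prefix sums of both vectors."""
--     assert len(gamma2) == len(gamma1), "Charge vectors must have equal dimension"
--     total = s1 = s2 = 0
--     for a, b in zip(gamma1, gamma2):
--         total += s1 * b - s2 * a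
--         s1 += a
--         s2 += b
--     return total
-- ===== Notes on version B (the rewrite author's own statement) =====
-- stated objective: faster
-- what changed: Replaced the nested i<j double loop by a single zip pass that maintains running prefix sums of both vectors (and dropped the redundant n==2 special case).
import Mathlib
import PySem

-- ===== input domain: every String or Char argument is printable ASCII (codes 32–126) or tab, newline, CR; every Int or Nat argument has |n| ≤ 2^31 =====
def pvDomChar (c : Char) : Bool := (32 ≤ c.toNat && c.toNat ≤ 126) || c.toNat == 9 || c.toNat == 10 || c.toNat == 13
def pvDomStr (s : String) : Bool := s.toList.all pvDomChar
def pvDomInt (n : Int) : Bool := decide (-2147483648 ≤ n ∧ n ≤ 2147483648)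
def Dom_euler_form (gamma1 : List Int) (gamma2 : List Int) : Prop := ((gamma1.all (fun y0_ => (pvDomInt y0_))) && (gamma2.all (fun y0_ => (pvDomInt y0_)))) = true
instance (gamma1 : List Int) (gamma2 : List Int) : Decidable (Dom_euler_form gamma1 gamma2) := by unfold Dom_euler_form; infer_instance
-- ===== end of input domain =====

-- B replaces A's nested i<j double loop by one pass with running prefix sums of both vectors: O(n) instead of O(n^2).

-- ===== PORT A =====
-- Literal transliteration of A: n == 2 special case, else nested index loops.
-- Indexing uses pyGetD with default 0: under Pre_ (equal lengths) every index is in range.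
def euler_form (gamma1 : List Int) (gamma2 : List Int) : Int :=
  let n : Int := gamma1.length
  if n = 2 then
    PySem.List.pyGetD gamma1 0 0 * PySem.List.pyGetD gamma2 1 0 -
      PySem.List.pyGetD gamma1 1 0 * PySem.List.pyGetD gamma2 0 0
  else
    (PySem.List.pyRange 0 n 1).foldl (fun total i =>
      (PySem.List.pyRange (i + 1) n 1).foldl (fun total j =>
        total + (PySem.List.pyGetD gamma1 i 0 * PySem.List.pyGetD gamma2 j 0 -
                 PySem.List.pyGetD gamma1 j 0 * PySem.List.pyGetD gamma2 i 0)) total) 0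

-- ===== PORT B =====
-- One fold over the zipped lists carrying (total, prefix sum of gamma1, prefix sum of gamma2).
def eulerStep (st : Int × Int × Int) (ab : Int × Int) : Int × Int × Int :=
  (st.1 + st.2.1 * ab.2 - st.2.2 * ab.1, st.2.1 + ab.1, st.2.2 + ab.2)

def euler_form_alt (gamma1 : List Int) (gamma2 : List Int) : Int :=
  ((gamma1.zip gamma2).foldl eulerStep (0, 0, 0)).1

-- ===== PRECONDITION & SPEC =====
-- Pre_ excludes unequal-length inputs, on which A's assert raises AssertionError.
def Pre_euler_form (gamma1 : List Int) (gamma2 : List Int) : Prop := gamma1.length = gamma2.length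
instance (gamma1 : List Int) (gamma2 : List Int) : Decidable (Pre_euler_form gamma1 gamma2) := by unfold Pre_euler_form; infer_instance
def pvWitness_euler_form : List Int × List Int := ([1, 2, 3], [4, 5, 6])

def Spec_euler_form (gamma1 : List Int) (gamma2 : List Int) (out : Int) : Prop := out = euler_form_alt gamma1 gamma2
instance (gamma1 : List Int) (gamma2 : List Int) (out : Int) : Decidable (Spec_euler_form gamma1 gamma2 out) := by unfold Spec_euler_form; infer_instance

-- ===== CLAIM (what is proved, stated in full; the proofs are below) =====
def Claim_equal_euler_form : Prop := ∀ (gamma1 : List Int) (gamma2 : List Int), Dom_euler_form gamma1 gamma2 → Pre_euler_form gamma1 gamma2 → Spec_euler_form gamma1 gamma2 (euler_form gamma1 gamma2)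

-- ===== LEMMAS AND PROOFS =====

-- Structural value of the skew form on a zipped list: head against the rest, plus the rest.
def eulerS : List (Int × Int) → Int
  | [] => 0
  | (a, b) :: l => a * (l.map Prod.snd).sum - b * (l.map Prod.fst).sum + eulerS l

-- B's fold invariant.
lemma eulerStep_foldl (l : List (Int × Int)) (t s1 s2 : Int) :
    l.foldl eulerStep (t, s1, s2) =
      (t + s1 * (l.map Prod.snd).sum - s2 * (l.map Prod.fst).sum + eulerS l,
       s1 + (l.map Prod.fst).sum, s2 + (l.map Prod.snd).sum) := by
  induction l generalizing t s1 s2 with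
  | nil => simp [eulerS]
  | cons p l ih =>
    obtain ⟨a, b⟩ := p
    simp only [List.foldl_cons, eulerStep, eulerS, List.map_cons, List.sum_cons]
    rw [ih]
    simp only [Prod.mk.injEq]
    exact ⟨by ring, by ring, by ring⟩

lemma euler_alt_eq_S (gamma1 gamma2 : List Int) :
    euler_form_alt gamma1 gamma2 = eulerS (gamma1.zip gamma2) := by
  simp [euler_form_alt, eulerStep_foldl]

-- Index shift: range and indexing move together past a cons.
lemma pyRange_succ_shift (a b : Int) :
    PySem.List.pyRange (a + 1) (b + 1) = (PySem.List.pyRange a b).map (· + 1) := by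
  rw [PySem.List.pyRange_one, PySem.List.pyRange_one, List.map_map]
  have hab : (b + 1) - (a + 1) = b - a := by ring
  rw [hab]
  apply List.map_congr_left
  intro k _
  simp only [Function.comp_apply]
  ring

lemma pyGetD_cons_shift (x : Int) (xs : List Int) (j : Int) (h : 0 ≤ j) (d : Int) :
    PySem.List.pyGetD (x :: xs) (j + 1) d = PySem.List.pyGetD xs j d := by
  rw [PySem.List.pyGetD_of_nonneg _ _ (by omega), PySem.List.pyGetD_of_nonneg _ _ h]
  have hj : (j + 1).toNat = j.toNat + 1 := by omega
  rw [hj]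
  rfl

lemma pyGetD_cons_zero (x : Int) (xs : List Int) (d : Int) :
    PySem.List.pyGetD (x :: xs) 0 d = x := by
  rw [PySem.List.pyGetD_of_nonneg _ _ le_rfl]
  rfl

lemma sum_map_lin (l : List (Int × Int)) (a b : Int) :
    (l.map (fun p => a * p.2 - p.1 * b)).sum =
      a * (l.map Prod.snd).sum - b * (l.map Prod.fst).sum := by
  induction l with
  | nil => simp
  | cons p l ih => simp [ih]; ring

lemma sum_range_lin (as bs : List Int) (h : as.length = bs.length) (a b : Int) :
    ((PySem.List.pyRange 0 (as.length : Int)).map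
        (fun j => a * PySem.List.pyGetD bs j 0 - PySem.List.pyGetD as j 0 * b)).sum
      = a * bs.sum - b * as.sum := by
  have hz : (as.zip bs).length = as.length := by simp [h]
  have hmap : (PySem.List.pyRange 0 (as.length : Int)).map
        (fun j => a * PySem.List.pyGetD bs j 0 - PySem.List.pyGetD as j 0 * b)
      = (PySem.List.pyRange 0 (as.length : Int)).map
        ((fun p : Int × Int => a * p.2 - p.1 * b) ∘
          (fun j => PySem.List.pyGetD (as.zip bs) j (0, 0))) := by
    apply List.map_congr_left
    intro j hj
    obtain ⟨hj0, hjlt⟩ := PySem.List.mem_pyRange_one.mp hj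
    have e1 : PySem.List.pyGetD as j 0 = as[j.toNat]'(by omega) :=
      PySem.List.pyGetD_eq_getElem _ _ hj0 hjlt
    have e2 : PySem.List.pyGetD bs j 0 = bs[j.toNat]'(by omega) :=
      PySem.List.pyGetD_eq_getElem _ _ hj0 (by omega)
    have e3 : PySem.List.pyGetD (as.zip bs) j (0, 0) =
        (as.zip bs)[j.toNat]'(by omega) :=
      PySem.List.pyGetD_eq_getElem _ _ hj0 (by omega)
    simp only [Function.comp_apply, e1, e2, e3, List.getElem_zip]
  rw [hmap, ← List.map_map]
  have hlen : ((as.zip bs).length : Int) = (as.length : Int) := by exact_mod_cast hz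
  have hrz := PySem.List.map_pyGetD_pyRange_zero (as.zip bs) ((0 : Int), (0 : Int))
  simp only [PySem.List.len_eq] at hrz
  rw [← hlen, hrz, sum_map_lin, List.map_snd_zip (by omega), List.map_fst_zip (by omega)]

-- The double range-sum equals the structural value on the zipped list.
lemma sum_form (l1 : List Int) : ∀ l2 : List Int, l1.length = l2.length →
    ((PySem.List.pyRange 0 (l1.length : Int)).map (fun i =>
       ((PySem.List.pyRange (i + 1) (l1.length : Int)).map (fun j =>
          PySem.List.pyGetD l1 i 0 * PySem.List.pyGetD l2 j 0 -
            PySem.List.pyGetD l1 j 0 * PySem.List.pyGetD l2 i 0)).sum)).sum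
      = eulerS (l1.zip l2) := by
  induction l1 with
  | nil =>
    intro l2 h
    simp [PySem.List.pyRange_one, eulerS]
  | cons a as ih =>
    intro l2 h
    cases l2 with
    | nil => simp at h
    | cons b bs =>
      have hlen : as.length = bs.length := by simpa using h
      have hn : ((a :: as).length : Int) = (as.length : Int) + 1 := by
        simp
      rw [hn, PySem.List.pyRange_one_cons (by positivity), List.map_cons, List.sum_cons]
      -- head term (i = 0)
      have hhead :
          ((PySem.List.pyRange (0 + 1) ((as.length : Int) + 1)).map (fun j =>
            PySem.List.pyGetD (a :: as) 0 0 * PySem.List.pyGetD (b :: bs) j 0 -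
              PySem.List.pyGetD (a :: as) j 0 * PySem.List.pyGetD (b :: bs) 0 0)).sum
            = a * bs.sum - b * as.sum := by
        rw [pyRange_succ_shift, List.map_map]
        have hcongr : ∀ j ∈ PySem.List.pyRange 0 (as.length : Int),
            ((fun j => PySem.List.pyGetD (a :: as) 0 0 * PySem.List.pyGetD (b :: bs) j 0 -
              PySem.List.pyGetD (a :: as) j 0 * PySem.List.pyGetD (b :: bs) 0 0) ∘ (· + 1)) j
            = a * PySem.List.pyGetD bs j 0 - PySem.List.pyGetD as j 0 * b := by
          intro j hj
          obtain ⟨hj0, _⟩ := PySem.List.mem_pyRange_one.mp hj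
          simp only [Function.comp_apply, pyGetD_cons_shift _ _ _ hj0, pyGetD_cons_zero]
        rw [List.map_congr_left hcongr, sum_range_lin as bs hlen]
      rw [hhead]
      -- tail terms (i ≥ 1)
      have htail :
          ((PySem.List.pyRange (0 + 1) ((as.length : Int) + 1)).map (fun i =>
            ((PySem.List.pyRange (i + 1) ((as.length : Int) + 1)).map (fun j =>
              PySem.List.pyGetD (a :: as) i 0 * PySem.List.pyGetD (b :: bs) j 0 -
                PySem.List.pyGetD (a :: as) j 0 * PySem.List.pyGetD (b :: bs) i 0)).sum)).sum
            = eulerS (as.zip bs) := by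
        rw [pyRange_succ_shift, List.map_map]
        have hcongr : ∀ i ∈ PySem.List.pyRange 0 (as.length : Int),
            ((fun i =>
              ((PySem.List.pyRange (i + 1) ((as.length : Int) + 1)).map (fun j =>
                PySem.List.pyGetD (a :: as) i 0 * PySem.List.pyGetD (b :: bs) j 0 -
                  PySem.List.pyGetD (a :: as) j 0 * PySem.List.pyGetD (b :: bs) i 0)).sum) ∘ (· + 1)) i
            = ((PySem.List.pyRange (i + 1) (as.length : Int)).map (fun j =>
                PySem.List.pyGetD as i 0 * PySem.List.pyGetD bs j 0 -
                  PySem.List.pyGetD as j 0 * PySem.List.pyGetD bs i 0)).sum := by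
          intro i hi
          obtain ⟨hi0, _⟩ := PySem.List.mem_pyRange_one.mp hi
          simp only [Function.comp_apply]
          rw [pyRange_succ_shift, List.map_map]
          congr 1
          apply List.map_congr_left
          intro j hj
          obtain ⟨hj1, _⟩ := PySem.List.mem_pyRange_one.mp hj
          simp only [Function.comp_apply, pyGetD_cons_shift _ _ _ hi0,
            pyGetD_cons_shift _ _ _ (by omega : (0 : Int) ≤ j)]
        rw [List.map_congr_left hcongr, ih bs hlen]
      rw [htail]
      have hfst : ((as.zip bs).map Prod.fst) = as := List.map_fst_zip (by omega)
      have hsnd : ((as.zip bs).map Prod.snd) = bs := List.map_snd_zip (by omega)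
      simp [eulerS, hfst, hsnd]

-- ===== VERDICT (by name: the statement is the Claim_ definition above) =====
theorem euler_form_spec : Claim_equal_euler_form := by
  intro gamma1 gamma2 _ hpre
  unfold Spec_euler_form
  rw [euler_alt_eq_S]
  unfold euler_form
  by_cases h2 : (gamma1.length : Int) = 2
  · rw [if_pos h2]
    have h2n : gamma1.length = 2 := by exact_mod_cast h2
    obtain ⟨x, y, hxy⟩ := List.length_eq_two.mp h2n
    have h2m : gamma2.length = 2 := by rw [← hpre]; exact h2n
    obtain ⟨u, v, huv⟩ := List.length_eq_two.mp h2m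
    subst hxy huv
    simp [eulerS, PySem.List.pyGetD]
    ring
  · rw [if_neg h2]
    have hsplit :
        (PySem.List.pyRange 0 (gamma1.length : Int)).foldl (fun total i =>
          (PySem.List.pyRange (i + 1) (gamma1.length : Int)).foldl (fun total j =>
            total + (PySem.List.pyGetD gamma1 i 0 * PySem.List.pyGetD gamma2 j 0 -
                     PySem.List.pyGetD gamma1 j 0 * PySem.List.pyGetD gamma2 i 0)) total) 0
        = (PySem.List.pyRange 0 (gamma1.length : Int)).foldl (fun total i =>
          total + ((PySem.List.pyRange (i + 1) (gamma1.length : Int)).map (fun j =>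
            PySem.List.pyGetD gamma1 i 0 * PySem.List.pyGetD gamma2 j 0 -
              PySem.List.pyGetD gamma1 j 0 * PySem.List.pyGetD gamma2 i 0)).sum) 0 := by
      apply PySem.List.foldl_congr_mem
      intro acc i _
      rw [PySem.List.foldl_add]
    rw [hsplit, PySem.List.foldl_add, zero_add]
    exact sum_form gamma1 gamma2 hpre
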